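-- pv_equiv track=rewrite | github.com/junbeom-Son/baekjoon | 백준/Silver/1072. 게임/게임.py | getMinCountToChangeWinRate
-- ===== SOURCE A (Python) =====
-- def getWinRate(game, win):
--     return win * 100 // game
--
-- def getMinCountToChangeWinRate(X, Y):
--     Z = getWinRate(X, Y)
--     if Z >= 99:
--         return -1
--     answer = 2000000000
--     left = 1
--     right = answer
--     while left <= right:
--         mid = (left + right) // 2
--         winRate = getWinRate(X + mid, Y + mid)
--         if winRate > Z:
--             answer = mid
--             right = mid - 1
--         else:
--             left = mid + 1
--
--     if answer == 2000000000:
--         answer = -1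
--     return answer
-- ===== SOURCE B (Python) =====
-- def getMinCountToChangeWinRate(X, Y):
--     Z = Y * 100 // X
--     if Z >= 99:
--         return -1
--     # smallest mid with (Y+mid)*100 // (X+mid) > Z, i.e. (99-Z)*mid >= (Z+1)*X - 100*Y
--     num = (Z + 1) * X - 100 * Y
--     den = 99 - Z
--     mid_min = -(-num // den)  # ceiling division
--     if mid_min < 1:
--         mid_min = 1
--     return -1 if mid_min >= 2000000000 else mid_min
-- ===== Notes on version B (the rewrite author's own statement) =====
-- stated objective: simpler
-- what changed: Replaced the 31-iteration binary search over [1, 2e9] by directly solving the linear inequality (Y+mid)*100 >= (Z+1)*(X+mid) with one ceiling division, keeping the clamp to 1 and the >= 2000000000 -> -1 sentinel cap.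
-- outside the precondition, e.g. on getMinCountToChangeWinRate(0, 5): A raises ZeroDivisionError, B raises ZeroDivisionError; on getMinCountToChangeWinRate(-3, 2): A raises ZeroDivisionError, B returns 1; on getMinCountToChangeWinRate(-2067491041, 903184013): A returns -1, B returns 1
import Mathlib
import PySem

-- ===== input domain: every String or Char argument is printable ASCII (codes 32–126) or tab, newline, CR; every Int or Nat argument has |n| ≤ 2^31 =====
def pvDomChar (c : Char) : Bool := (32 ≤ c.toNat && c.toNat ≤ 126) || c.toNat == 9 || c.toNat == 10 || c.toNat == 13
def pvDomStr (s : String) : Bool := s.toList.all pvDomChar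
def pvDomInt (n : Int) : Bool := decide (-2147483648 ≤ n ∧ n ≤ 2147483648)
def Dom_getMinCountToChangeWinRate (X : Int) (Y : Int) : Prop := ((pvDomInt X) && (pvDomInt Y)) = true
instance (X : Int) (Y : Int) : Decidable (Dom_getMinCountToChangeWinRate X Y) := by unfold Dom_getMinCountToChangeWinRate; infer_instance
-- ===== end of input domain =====

-- B replaces A's binary search over [1, 2e9] by one ceiling division solving the same inequality (simpler; same cap-and-sentinel result).


-- ===== PORT A =====
def pvGetWinRate (game : Int) (win : Int) : Int := PySem.Int.floordiv (win * 100) game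

-- the while-loop of A; state (left, right, answer)
def pvLoopA (X : Int) (Y : Int) (Z : Int) (left : Int) (right : Int) (answer : Int) : Int :=
  if _h : left ≤ right then
    let mid := PySem.Int.floordiv (left + right) 2
    if pvGetWinRate (X + mid) (Y + mid) > Z then
      pvLoopA X Y Z left (mid - 1) mid
    else
      pvLoopA X Y Z (mid + 1) right answer
  else answer
termination_by (right + 1 - left).toNat
decreasing_by
  · have := PySem.Int.floordiv_two_mid_bounds _h
    omega
  · have := PySem.Int.floordiv_two_mid_bounds _h
    omega

def getMinCountToChangeWinRate (X : Int) (Y : Int) : Int :=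
  let Z := pvGetWinRate X Y
  if Z ≥ 99 then -1
  else
    let answer := pvLoopA X Y Z 1 2000000000 2000000000
    if answer = 2000000000 then -1 else answer

-- ===== PORT B =====
def getMinCountToChangeWinRate_alt (X : Int) (Y : Int) : Int :=
  let Z := PySem.Int.floordiv (Y * 100) X
  if Z ≥ 99 then -1
  else
    let num := (Z + 1) * X - 100 * Y
    let den := 99 - Z
    let midMin0 := -(PySem.Int.floordiv (-num) den)   -- ceiling division
    let midMin := if midMin0 < 1 then 1 else midMin0
    if midMin ≥ 2000000000 then -1 else midMin

-- ===== PRECONDITION & SPEC =====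
-- Pre_ excludes X = 0 and negative X with 100*Y > 99*X: on those A either raises
-- ZeroDivisionError (X = 0, or the binary search evaluates a mid with X + mid = 0), or —
-- only when X is below about -2e9, so the zero divisor is out of the search's reach — A
-- returns -1 as a leftover of the sentinel after a search over meaningless negative
-- totals, an artefact of the implementation on inputs outside the problem's domain.
def Pre_getMinCountToChangeWinRate (X : Int) (Y : Int) : Prop :=
  1 ≤ X ∨ (X < 0 ∧ 100 * Y ≤ 99 * X)
instance (X : Int) (Y : Int) : Decidable (Pre_getMinCountToChangeWinRate X Y) := by
  unfold Pre_getMinCountToChangeWinRate; infer_instance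

def pvWitness_getMinCountToChangeWinRate : Int × Int := (10, 8)

def Spec_getMinCountToChangeWinRate (X : Int) (Y : Int) (out : Int) : Prop := out = getMinCountToChangeWinRate_alt X Y
instance (X : Int) (Y : Int) (out : Int) : Decidable (Spec_getMinCountToChangeWinRate X Y out) := by unfold Spec_getMinCountToChangeWinRate; infer_instance

-- ===== CLAIM (what is proved, stated in full; the proofs are below) =====
def Claim_equal_getMinCountToChangeWinRate : Prop := ∀ (X : Int) (Y : Int), Dom_getMinCountToChangeWinRate X Y → Pre_getMinCountToChangeWinRate X Y → Spec_getMinCountToChangeWinRate X Y (getMinCountToChangeWinRate X Y)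

-- ===== LEMMAS AND PROOFS =====

-- On 1 ≤ X with Z ≤ 98, the loop's test at mid is monotone: it holds iff c ≤ mid,
-- where c is B's clamped ceiling.
theorem pv_pred_iff (X Y Z c : Int) (hX : 1 ≤ X) (hZ : Z ≤ 98)
    (hc : c = max 1 (-(PySem.Int.floordiv (-((Z + 1) * X - 100 * Y)) (99 - Z)))) :
    ∀ m : Int, 1 ≤ m → (pvGetWinRate (X + m) (Y + m) > Z ↔ c ≤ m) := by
  intro m hm
  have hden : (0 : Int) < 99 - Z := by omega
  have hgame : (0 : Int) < X + m := by omega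
  have h1 : pvGetWinRate (X + m) (Y + m) > Z ↔ (Z + 1) * (X + m) ≤ (Y + m) * 100 := by
    unfold pvGetWinRate
    constructor
    · intro h
      have : Z + 1 ≤ PySem.Int.floordiv ((Y + m) * 100) (X + m) := by omega
      rw [PySem.Int.le_floordiv_iff_mul_le hgame] at this
      exact this
    · intro h
      have : Z + 1 ≤ PySem.Int.floordiv ((Y + m) * 100) (X + m) := by
        rw [PySem.Int.le_floordiv_iff_mul_le hgame]; exact h
      omega
  have h2 : (Z + 1) * (X + m) ≤ (Y + m) * 100 ↔ (Z + 1) * X - 100 * Y ≤ (99 - Z) * m := by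
    constructor <;> intro h <;> nlinarith [h]
  have h3 : (Z + 1) * X - 100 * Y ≤ (99 - Z) * m ↔
      -(PySem.Int.floordiv (-((Z + 1) * X - 100 * Y)) (99 - Z)) ≤ m := by
    constructor
    · intro h
      have : -m ≤ PySem.Int.floordiv (-((Z + 1) * X - 100 * Y)) (99 - Z) := by
        rw [PySem.Int.le_floordiv_iff_mul_le hden]; nlinarith [h]
      omega
    · intro h
      have : -m ≤ PySem.Int.floordiv (-((Z + 1) * X - 100 * Y)) (99 - Z) := by omega
      rw [PySem.Int.le_floordiv_iff_mul_le hden] at this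
      nlinarith [this]
  rw [h1, h2, h3, hc]
  omega

-- The binary search returns c (the least mid passing the test) when c ≤ right, else answer.
theorem pv_loop_eq (X Y Z c : Int)
    (hP : ∀ m : Int, 1 ≤ m → (pvGetWinRate (X + m) (Y + m) > Z ↔ c ≤ m)) :
    ∀ (n : Nat) (left right answer : Int), (right + 1 - left).toNat ≤ n →
      1 ≤ left → left ≤ c →
      pvLoopA X Y Z left right answer = if c ≤ right then c else answer := by
  intro n
  induction n with
  | zero =>
    intro left right answer hn h1 hc
    rw [pvLoopA, dif_neg (by omega), if_neg (by omega)]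
  | succ n ih =>
    intro left right answer hn h1 hc
    rw [pvLoopA]
    by_cases hlr : left ≤ right
    · rw [dif_pos hlr]
      have hmid := PySem.Int.floordiv_two_mid_bounds hlr
      set mid := PySem.Int.floordiv (left + right) 2 with hm
      by_cases hp : pvGetWinRate (X + mid) (Y + mid) > Z
      · rw [if_pos hp]
        have hcm : c ≤ mid := (hP mid (by omega)).mp hp
        rw [ih left (mid - 1) mid (by omega) h1 hc]
        have : c ≤ right := by omega
        rw [if_pos this]
        by_cases h' : c ≤ mid - 1
        · rw [if_pos h']
        · rw [if_neg h']; omega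
      · rw [if_neg hp]
        have hcm : ¬ c ≤ mid := fun h => hp ((hP mid (by omega)).mpr h)
        exact ih (mid + 1) right answer (by omega) (by omega) (by omega)
    · rw [dif_neg hlr, if_neg (by omega)]

-- On the early-exit region X < 0 ∧ 100Y ≤ 99X, Z ≥ 99.
theorem pv_Z_ge_99_of_neg (X Y : Int) (hX : X < 0) (h : 100 * Y ≤ 99 * X) :
    99 ≤ PySem.Int.floordiv (Y * 100) X := by
  rw [← PySem.Int.floordiv_neg_neg, PySem.Int.le_floordiv_iff_mul_le (by omega)]
  omega

-- ===== VERDICT (by name: the statement is the Claim_ definition above) =====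
theorem getMinCountToChangeWinRate_spec : Claim_equal_getMinCountToChangeWinRate := by
  intro X Y _hDom hPre
  unfold Spec_getMinCountToChangeWinRate getMinCountToChangeWinRate getMinCountToChangeWinRate_alt
  have hZeq : pvGetWinRate X Y = PySem.Int.floordiv (Y * 100) X := rfl
  rcases hPre with hX | ⟨hXneg, hY⟩
  · -- 1 ≤ X
    set Z := PySem.Int.floordiv (Y * 100) X with hZ
    rw [hZeq]
    by_cases hZ99 : Z ≥ 99
    · rw [if_pos hZ99, if_pos hZ99]
    · rw [if_neg hZ99, if_neg hZ99]
      set c := max 1 (-(PySem.Int.floordiv (-((Z + 1) * X - 100 * Y)) (99 - Z))) with hc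
      have hP := pv_pred_iff X Y Z c hX (by omega) hc
      have hloop := pv_loop_eq X Y Z c hP 2000000000 1 2000000000 2000000000
        (by omega) (by omega) (by omega)
      rw [hloop]
      simp only
      by_cases hsmall : -(PySem.Int.floordiv (-((Z + 1) * X - 100 * Y)) (99 - Z)) < 1
      · rw [if_pos hsmall]
        have : c = 1 := by omega
        rw [this]
        rw [if_pos (by omega : (1:Int) ≤ 2000000000), if_neg (by omega : ¬ (1:Int) = 2000000000),
            if_neg (by omega : ¬ (1:Int) ≥ 2000000000)]
      · rw [if_neg hsmall]
        have hceq : c = -(PySem.Int.floordiv (-((Z + 1) * X - 100 * Y)) (99 - Z)) := by omega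
        rw [← hceq]
        by_cases hle : c ≤ 2000000000
        · rw [if_pos hle]
          by_cases heq : c = 2000000000
          · rw [if_pos heq, if_pos (by omega)]
          · rw [if_neg heq, if_neg (by omega)]
        · rw [if_neg hle, if_pos (by omega : (2000000000:Int) = 2000000000), if_pos (by omega)]
  · -- X < 0 and 100Y ≤ 99X: both take the Z ≥ 99 early exit
    have h99 := pv_Z_ge_99_of_neg X Y hXneg hY
    rw [hZeq, if_pos h99, if_pos h99]
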